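-- pv_equiv track=rewrite | github.com/YBZh/OpenOOD-VLM | openood/datasets/imglist_dataset.py | split_dataset_by_label
-- ===== SOURCE A (Python) =====
-- from collections import defaultdict
--
-- def split_dataset_by_label(imglist):
--     data_splited = defaultdict(list)
--     for index in range(len(imglist)):
--         line = imglist[index].strip('\n')
--         tokens = line.split(' ', 1)
--         image_name, extra_str = tokens[0], tokens[1]
--         data_splited[extra_str].append(imglist[index])
--     return data_splited
-- ===== SOURCE B (Python) =====
-- from collections import defaultdict
--
--
-- def split_dataset_by_label(imglist):
--     # One label per line (text after the first space of the '\n'-stripped line),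
--     # then one filtering pass per distinct label, keys in first-occurrence order.
--     labels = [line.strip('\n').split(' ', 1)[1] for line in imglist]
--     data_splited = defaultdict(list)
--     for key in dict.fromkeys(labels):
--         data_splited[key] = [line for line, lab in zip(imglist, labels) if lab == key]
--     return data_splited
-- ===== Notes on version B (the rewrite author's own statement) =====
-- stated objective: alternative
-- what changed: B precomputes all labels in one pass, dedups them in first-occurrence order, and builds each group by a per-key filter over zip(imglist, labels), instead of A's single pass appending into a defaultdict.
import Mathlib
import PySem

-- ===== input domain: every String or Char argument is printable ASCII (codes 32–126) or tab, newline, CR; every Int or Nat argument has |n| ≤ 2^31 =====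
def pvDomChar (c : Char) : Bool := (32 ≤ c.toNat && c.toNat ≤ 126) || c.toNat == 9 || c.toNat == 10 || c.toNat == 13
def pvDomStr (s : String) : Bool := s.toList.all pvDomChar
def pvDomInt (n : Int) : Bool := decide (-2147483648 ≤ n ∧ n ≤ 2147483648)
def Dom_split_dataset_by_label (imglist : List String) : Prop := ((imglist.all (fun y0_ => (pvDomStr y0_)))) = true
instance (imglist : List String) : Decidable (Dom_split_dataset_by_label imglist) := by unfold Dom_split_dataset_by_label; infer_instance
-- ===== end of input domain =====

-- B builds the same grouping by one label-extraction pass plus a per-distinct-label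
-- filtering pass, instead of A's single appending pass into a defaultdict
-- (objective: alternative decomposition; not faster).

-- shared label extraction, literally `line.strip('\n').split(' ', 1)[1]` (none = IndexError)
def pyLabel? (s : String) : Option String :=
  (PySem.Str.splitMax? (PySem.Str.stripChars s "\n") " " 1).bind
    (fun tokens => PySem.List.pyGet? tokens 1)

-- ===== PORT A =====
def split_dataset_by_label (imglist : List String) : List (String × List String) :=
  (imglist.foldl
    (fun d line =>
      match pyLabel? line with
      | some extra_str => d.modify extra_str [] (· ++ [line])   -- data_splited[extra_str].append(line)
      | none => d)                                              -- unreached under Pre_ (IndexError)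
    PySem.Dict.empty).items

-- ===== PORT B =====
def split_dataset_by_label_alt (imglist : List String) : List (String × List String) :=
  let labels := imglist.map pyLabel?
  ((PySem.List.dedup labels).foldl                              -- dict.fromkeys(labels)
    (fun d k =>
      match k with
      | some key =>
          d.insert key
            (((imglist.zip labels).filter (fun p => p.2 == k)).map (fun p => p.1))
      | none => d)                                              -- unreached under Pre_ (IndexError)
    PySem.Dict.empty).items

-- ===== PRECONDITION & SPEC =====
-- Pre_ excludes exactly the inputs containing a line with no space after stripping
-- '\n': there `tokens[1]` raises IndexError in A (and B raises identically).
def Pre_split_dataset_by_label (imglist : List String) : Prop :=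
  ∀ s ∈ imglist, ' ' ∈ (PySem.Str.stripChars s "\n").toList
instance (imglist : List String) : Decidable (Pre_split_dataset_by_label imglist) := by unfold Pre_split_dataset_by_label; infer_instance

def pvWitness_split_dataset_by_label : List String :=
  ["img/a.png 0\n", "img/b.png 1\n", "img/c.png 0\n"]

def Spec_split_dataset_by_label (imglist : List String) (out : List (String × List String)) : Prop := out = split_dataset_by_label_alt imglist
instance (imglist : List String) (out : List (String × List String)) : Decidable (Spec_split_dataset_by_label imglist out) := by unfold Spec_split_dataset_by_label; infer_instance

-- ===== CLAIM (what is proved, stated in full; the proofs are below) =====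
def Claim_equal_split_dataset_by_label : Prop := ∀ (imglist : List String), Dom_split_dataset_by_label imglist → Pre_split_dataset_by_label imglist → Spec_split_dataset_by_label imglist (split_dataset_by_label imglist)

-- ===== LEMMAS AND PROOFS =====

-- proof-side form of the label: text after the first space of the '\n'-stripped line
def labelF (s : String) : String :=
  String.ofList (((PySem.Chars.stripChars s.toList ['\n']).dropWhile (· ≠ ' ')).tail)

-- splitOnMax's worker with maxsplit exhausted returns the rest as the final piece
theorem go_zero (fuel : Nat) (l cur : List Char) (acc : List (List Char)) :
    PySem.Chars.splitOnMax.go [' '] fuel 0 l cur acc = ((cur.reverse ++ l) :: acc).reverse := by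
  cases fuel with
  | zero => simp [PySem.Chars.splitOnMax.go]
  | succ f => cases l with
    | nil => simp [PySem.Chars.splitOnMax.go]
    | cons c rest => simp [PySem.Chars.splitOnMax.go]

-- splitOnMax's worker with maxsplit 1 splits at the first space
theorem go_one (fuel : Nat) : ∀ (cs cur : List Char) (acc : List (List Char)),
    cs.length < fuel → ' ' ∈ cs →
    PySem.Chars.splitOnMax.go [' '] fuel 1 cs cur acc =
      ((cur.reverse ++ cs.takeWhile (· ≠ ' ')) :: acc).reverse ++ [(cs.dropWhile (· ≠ ' ')).tail] := by
  induction fuel with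
  | zero => intro cs cur acc h hm; omega
  | succ f ih =>
    intro cs cur acc h hm
    cases cs with
    | nil => simp at hm
    | cons c rest =>
      by_cases hc : c = ' '
      · subst hc
        rw [show PySem.Chars.splitOnMax.go [' '] (f+1) 1 (' '::rest) cur acc =
            PySem.Chars.splitOnMax.go [' '] f 0 (List.drop 1 (' '::rest)) [] (cur.reverse :: acc) from by
          simp [PySem.Chars.splitOnMax.go, List.isPrefixOf]]
        rw [go_zero]
        simp [List.takeWhile, List.dropWhile]
      · have hm' : ' ' ∈ rest := by cases hm with | head => exact absurd rfl hc | tail _ h => exact h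
        rw [show PySem.Chars.splitOnMax.go [' '] (f+1) 1 (c::rest) cur acc =
            PySem.Chars.splitOnMax.go [' '] f 1 rest (c :: cur) acc from by
          simp [PySem.Chars.splitOnMax.go, List.isPrefixOf, Ne.symm hc]]
        rw [ih rest (c::cur) acc (by simpa using h) hm']
        simp [List.takeWhile, List.dropWhile, hc]

-- on a line whose stripped form contains a space, the token extraction returns labelF
theorem pyLabel?_eq (s : String) (h : ' ' ∈ (PySem.Str.stripChars s "\n").toList) :
    pyLabel? s = some (labelF s) := by
  have h' : ' ' ∈ PySem.Chars.stripChars s.toList ['\n'] := by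
    rw [PySem.Str.toList_stripChars] at h; exact h
  unfold pyLabel? labelF
  simp only [PySem.Str.splitMax?, PySem.Str.toList_stripChars]
  have hs : PySem.Chars.splitMax? (PySem.Chars.stripChars s.toList ("\n".toList)) (" ".toList) 1 =
      some [(PySem.Chars.stripChars s.toList ['\n']).takeWhile (· ≠ ' '),
            ((PySem.Chars.stripChars s.toList ['\n']).dropWhile (· ≠ ' ')).tail] := by
    show PySem.Chars.splitMax? (PySem.Chars.stripChars s.toList ['\n']) [' '] 1 = _
    simp only [PySem.Chars.splitMax?, PySem.Chars.splitOnMax]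
    rw [if_neg (by simp), if_neg (by norm_num)]
    rw [show (1 : Int).toNat = 1 from rfl]
    rw [go_one ((PySem.Chars.stripChars s.toList ['\n']).length + 1) _ [] [] (by omega) h']
    simp
  rw [hs]
  simp [PySem.List.pyGet?, PySem.List.pyIdx?]

-- ordered dedup commutes with wrapping every element in `some`
theorem dedup_map_some {α : Type} [BEq α] [LawfulBEq α] (l : List α) :
    PySem.List.dedup (l.map some) = (PySem.List.dedup l).map some := by
  induction l with
  | nil => rfl
  | cons x xs ih =>
    simp only [List.map_cons, PySem.List.dedup_eq_ofList] at *
    rw [PySem.Set.ofList_cons, PySem.Set.ofList_cons, ih]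
    simp [PySem.Set.discard, List.filter_map, Function.comp_def]

-- both ports reduce to: distinct labels in first-occurrence order, each with its filtered lines
theorem ports_agree (imglist : List String)
    (hpre : ∀ s ∈ imglist, ' ' ∈ (PySem.Str.stripChars s "\n").toList) :
    split_dataset_by_label imglist = split_dataset_by_label_alt imglist := by
  have hlab : ∀ x ∈ imglist, pyLabel? x = some (labelF x) := fun x hx => pyLabel?_eq x (hpre x hx)
  have hmap : imglist.map pyLabel? = (imglist.map labelF).map some := by
    rw [List.map_map]; exact List.map_congr_left hlab
  set ks := PySem.List.dedup (imglist.map labelF) with hks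
  have hA : split_dataset_by_label imglist =
      ks.map (fun k => (k, imglist.filter (fun x => labelF x == k))) := by
    unfold split_dataset_by_label
    rw [PySem.List.foldl_congr_mem _ _ (fun d x => d.modify (labelF x) [] (· ++ [x])) _
      (by intro acc x hx; rw [hlab x hx])]
    have hdA : imglist.foldl (fun d x => d.modify (labelF x) [] (· ++ [x])) PySem.Dict.empty =
        (imglist.map (fun x => (labelF x, x))).foldl
          (fun d p => d.modify p.1 [] (· ++ [p.2])) PySem.Dict.empty := by
      rw [List.foldl_map]
    have hkeys : (imglist.foldl (fun d x => d.modify (labelF x) [] (· ++ [x]))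
        PySem.Dict.empty).keys = ks := by
      rw [PySem.Dict.keys_foldl_modify_key imglist labelF [] (fun _ x => (· ++ [x]))]
      simp [PySem.Set.update_nil_left, hks]
    have hnd : (imglist.foldl (fun d x => d.modify (labelF x) [] (· ++ [x]))
        PySem.Dict.empty).keys.Nodup := by
      rw [hkeys]; exact PySem.List.nodup_dedup _
    rw [PySem.Dict.items_eq_map_keys _ hnd [], hkeys]
    apply List.map_congr_left
    intro k hk
    rw [hdA, PySem.Dict.getD_foldl_modify_append]
    simp [List.filter_map, Function.comp_def]
  have hB : split_dataset_by_label_alt imglist =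
      ks.map (fun k => (k, imglist.filter (fun x => labelF x == k))) := by
    unfold split_dataset_by_label_alt
    simp only [hmap, dedup_map_some, ← hks]
    rw [List.foldl_map]
    have hz : imglist.zip ((imglist.map labelF).map some) =
        imglist.map (fun a => (a, some (labelF a))) := by
      rw [List.map_map]
      simpa using @List.zip_map' _ _ _ id (fun x => some (labelF x)) imglist
    simp only [hz]
    rw [show (fun (d : PySem.Dict String (List String)) (k : String) =>
        match some k with
        | some key => d.insert key
            (((imglist.map (fun a => (a, some (labelF a)))).filter
              (fun p => p.2 == some k)).map (fun p => p.1))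
        | none => d) = (fun d k => d.insert k (imglist.filter (fun x => labelF x == k))) from by
      funext d k
      simp [List.filter_map, Function.comp_def]]
    have hfresh := PySem.Dict.items_foldl_insert_fresh ks (fun a => a)
      (fun k => imglist.filter (fun x => labelF x == k)) PySem.Dict.empty
      (by intro a _; simp) (by simpa using PySem.List.nodup_dedup _)
    simpa using hfresh
  rw [hA, hB]

-- ===== VERDICT (by name: the statement is the Claim_ definition above) =====
theorem split_dataset_by_label_spec : Claim_equal_split_dataset_by_label := by
  intro imglist _ hpre
  unfold Spec_split_dataset_by_label
  exact ports_agree imglist hpre
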